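-- pv_equiv track=rewrite | github.com/spenkleburger/Simplified_Error_Registry | src/consolidation_app/parser.py | _unescape_markdown_header
-- ===== SOURCE A (Python) =====
-- def _unescape_markdown_header(text: str) -> str:
--     """Reverse _escape_markdown_header: remove backslash escapes."""
--
--     replacements = [
--         (r"\#", "#"),
--         (r"\*", "*"),
--         (r"\[", "["),
--         (r"\]", "]"),
--         (r"\(", "("),
--         (r"\)", ")"),
--         (r"\<", "<"),
--         (r"\>", ">"),
--         (r"\`", "`"),
--         (r"\_", "_"),
--         (r"\~", "~"),
--     ]
--     out = text
--     for escaped, char in replacements: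
--         out = out.replace(escaped, char)
--     return out
-- ===== SOURCE B (Python) =====
-- _SPECIALS = set("#*[]()<>`_~")
--
-- def _unescape_markdown_header(text: str) -> str:
--     res = []
--     i = 0
--     n = len(text)
--     while i < n:
--         if text[i] == "\\" and i + 1 < n and text[i + 1] in _SPECIALS:
--             res.append(text[i + 1])
--             i += 2
--         else:
--             res.append(text[i])
--             i += 1
--     return "".join(res)
-- ===== Notes on version B (the rewrite author's own statement) =====
-- stated objective: alternative
-- what changed: Replaced the 11 sequential full-string replace passes with a single left-to-right character scan that consumes a backslash-plus-special pair in one step using a membership set.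
import Mathlib
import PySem

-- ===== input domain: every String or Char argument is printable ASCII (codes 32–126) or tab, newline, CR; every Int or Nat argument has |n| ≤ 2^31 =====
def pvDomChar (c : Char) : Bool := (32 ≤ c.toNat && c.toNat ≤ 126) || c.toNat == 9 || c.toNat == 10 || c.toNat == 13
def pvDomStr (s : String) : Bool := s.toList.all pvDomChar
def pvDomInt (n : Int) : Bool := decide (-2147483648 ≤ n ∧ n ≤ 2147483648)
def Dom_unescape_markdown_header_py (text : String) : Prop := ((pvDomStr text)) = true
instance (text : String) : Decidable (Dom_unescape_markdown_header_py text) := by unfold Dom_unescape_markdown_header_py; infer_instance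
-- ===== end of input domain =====

-- B replaces A's 11 sequential full-string replace passes by one left-to-right character
-- scan with a membership test (objective: alternative single-pass decomposition).

-- ===== PORT A =====
def unescape_markdown_header_py (text : String) : String :=
  let replacements : List (String × String) :=
    [("\\#", "#"), ("\\*", "*"), ("\\[", "["), ("\\]", "]"), ("\\(", "("),
     ("\\)", ")"), ("\\<", "<"), ("\\>", ">"), ("\\`", "`"), ("\\_", "_"), ("\\~", "~")]
  replacements.foldl (fun out p => PySem.Str.replace out p.1 p.2) text

-- ===== PORT B =====
-- the set of special characters (Source B's _SPECIALS)
def pvSpecials : List Char := ['#', '*', '[', ']', '(', ')', '<', '>', '`', '_', '~']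

-- Source B's while loop: consume "\c" (c special) as one step emitting c, else emit one char
def pvScan (S : List Char) : List Char → List Char
  | [] => []
  | [x] => [x]
  | x :: y :: rest =>
      if x = '\\' ∧ y ∈ S then y :: pvScan S rest
      else x :: pvScan S (y :: rest)
  termination_by s => s.length

def unescape_markdown_header_py_alt (text : String) : String :=
  String.ofList (pvScan pvSpecials text.toList)

-- ===== PRECONDITION & SPEC =====
def Spec_unescape_markdown_header_py (text : String) (out : String) : Prop := out = unescape_markdown_header_py_alt text
instance (text : String) (out : String) : Decidable (Spec_unescape_markdown_header_py text out) := by unfold Spec_unescape_markdown_header_py; infer_instance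

-- ===== CLAIM (what is proved, stated in full; the proofs are below) =====
def Claim_equal_unescape_markdown_header_py : Prop := ∀ (text : String), Dom_unescape_markdown_header_py text → Spec_unescape_markdown_header_py text (unescape_markdown_header_py text)

-- ===== LEMMAS AND PROOFS =====

lemma pvScan_cons_ne (S : List Char) (x : Char) (hx : x ≠ '\\') (t : List Char) :
    pvScan S (x :: t) = x :: pvScan S t := by
  cases t <;> simp [pvScan, hx]

lemma pvScan_head_ne (S : List Char) (c : Char) (hc : c ≠ '\\') (hcS : c ∉ S)
    (t : List Char) : (pvScan S ('\\' :: t)).head? ≠ some c := by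
  cases t with
  | nil => simp [pvScan, Ne.symm hc]
  | cons y r =>
      by_cases hy : y ∈ S
      · simp [pvScan, hy]
        intro h; exact hcS (h ▸ hy)
      · simp [pvScan, hy, Ne.symm hc]

lemma pvScan_skip (c : Char) (X : List Char) (h : X.head? ≠ some c) :
    pvScan [c] ('\\' :: X) = '\\' :: pvScan [c] X := by
  cases X with
  | nil => simp [pvScan]
  | cons y r =>
      have hy : y ≠ c := by simpa using h
      simp [pvScan, hy]

lemma pvScan_comp (c : Char) (S : List Char) (hc : c ≠ '\\') (hcS : c ∉ S)
    (hS : '\\' ∉ S) :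
    ∀ (n : Nat) (s : List Char), s.length ≤ n →
      pvScan [c] (pvScan S s) = pvScan (S ++ [c]) s := by
  intro n
  induction n with
  | zero =>
      intro s hs
      have : s = [] := List.length_eq_zero_iff.mp (Nat.le_zero.mp hs)
      simp [this, pvScan]
  | succ n ih =>
      intro s hs
      match s with
      | [] => simp [pvScan]
      | [x] => simp [pvScan]
      | x :: y :: rest =>
        have hrest : rest.length ≤ n := by simp at hs; omega
        have hyrest : (y :: rest).length ≤ n := by simp at hs ⊢; omega
        by_cases hx : x = '\\'
        · subst hx
          by_cases hy : y ∈ S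
          · have hy' : y ≠ '\\' := fun h => hS (h ▸ hy)
            have hstep : pvScan S ('\\' :: y :: rest) = y :: pvScan S rest := by
              simp [pvScan, hy]
            rw [hstep, pvScan_cons_ne [c] y hy', ih rest hrest]
            have : pvScan (S ++ [c]) ('\\' :: y :: rest) = y :: pvScan (S ++ [c]) rest := by
              simp [pvScan, hy]
            rw [this]
          · have hstep : pvScan S ('\\' :: y :: rest) = '\\' :: pvScan S (y :: rest) := by
              simp [pvScan, hy]
            by_cases hyc : y = c
            · subst hyc
              have hy' : y ≠ '\\' := hc
              rw [hstep, pvScan_cons_ne S y hy']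
              have h1 : pvScan [y] ('\\' :: y :: pvScan S rest) = y :: pvScan [y] (pvScan S rest) := by
                simp [pvScan]
              rw [h1, ih rest hrest]
              have h2 : pvScan (S ++ [y]) ('\\' :: y :: rest) = y :: pvScan (S ++ [y]) rest := by
                simp [pvScan]
              rw [h2]
            · by_cases hy' : y = '\\'
              · subst hy'
                rw [hstep, pvScan_skip c _ (pvScan_head_ne S c hc hcS rest),
                    ih _ hyrest]
                have h2 : pvScan (S ++ [c]) ('\\' :: '\\' :: rest)
                    = '\\' :: pvScan (S ++ [c]) ('\\' :: rest) := by
                  simp [pvScan, hS, Ne.symm hc]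
                rw [h2]
              · rw [hstep, pvScan_cons_ne S y hy']
                have h1 : pvScan [c] ('\\' :: y :: pvScan S rest)
                    = '\\' :: pvScan [c] (y :: pvScan S rest) := by
                  simp [pvScan, hyc]
                rw [h1, pvScan_cons_ne [c] y hy', ih rest hrest]
                have h2 : pvScan (S ++ [c]) ('\\' :: y :: rest)
                    = '\\' :: pvScan (S ++ [c]) (y :: rest) := by
                  simp [pvScan, hy, hyc]
                rw [h2, pvScan_cons_ne (S ++ [c]) y hy']
        · rw [pvScan_cons_ne S x hx, pvScan_cons_ne [c] x hx, ih _ hyrest,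
              pvScan_cons_ne (S ++ [c]) x hx]

lemma pv_go_eq (c : Char) (hc : c ≠ '\\') :
    ∀ (fuel : Nat) (l acc : List Char), l.length ≤ fuel →
      PySem.Chars.replace.go ['\\', c] [c] fuel l acc = acc.reverse ++ pvScan [c] l := by
  intro fuel
  induction fuel with
  | zero =>
      intro l acc hl
      have : l = [] := List.length_eq_zero_iff.mp (Nat.le_zero.mp hl)
      simp [this, PySem.Chars.replace.go, pvScan]
  | succ fuel ih =>
      intro l acc hl
      match l with
      | [] => simp [PySem.Chars.replace.go, pvScan]
      | [x] =>
          have hpre : (['\\', c].isPrefixOf [x]) = false := by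
            simp [List.isPrefixOf]
          rw [PySem.Chars.replace.go]
          simp only [hpre, Bool.false_eq_true, if_false]
          rw [ih [] (x :: acc) (by simp)]
          simp [pvScan]
      | x :: y :: t =>
          rw [PySem.Chars.replace.go]
          by_cases hm : x = '\\' ∧ y = c
          · obtain ⟨hx, hy⟩ := hm
            subst hx; subst hy
            have hpre : (['\\', y].isPrefixOf ('\\' :: y :: t)) = true := by
              simp [List.isPrefixOf]
            simp only [hpre, if_true, List.length_cons, List.drop_succ_cons,
              List.drop_zero, List.length_nil]
            rw [ih t ([y].reverse ++ acc) (by simp at hl ⊢; omega)]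
            simp [pvScan]
          · have hpre : (['\\', c].isPrefixOf (x :: y :: t)) = false := by
              simp [List.isPrefixOf]
              intro hx hy; exact hm ⟨hx.symm, hy.symm⟩
            simp only [hpre, Bool.false_eq_true, if_false]
            rw [ih (y :: t) (x :: acc) (by simp at hl ⊢; omega)]
            have hcond : ¬ (x = '\\' ∧ y ∈ [c]) := by simpa using hm
            have : pvScan [c] (x :: y :: t) = x :: pvScan [c] (y :: t) := by
              rw [pvScan.eq_def]
              simp only [if_neg hcond]
            simp [this]

lemma pv_replace_eq (c : Char) (hc : c ≠ '\\') (l : List Char) :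
    PySem.Chars.replace l ['\\', c] [c] = pvScan [c] l := by
  rw [PySem.Chars.replace]
  simp only [List.isEmpty_cons, Bool.false_eq_true, if_false]
  rw [pv_go_eq c hc l.length l [] le_rfl]
  simp

lemma pvScan_comp' (c : Char) (S : List Char) (hc : c ≠ '\\') (hcS : c ∉ S)
    (hS : '\\' ∉ S) (s : List Char) :
    pvScan [c] (pvScan S s) = pvScan (S ++ [c]) s :=
  pvScan_comp c S hc hcS hS s.length s le_rfl

lemma pv_fold_eq (text : String) :
    (unescape_markdown_header_py text).toList = pvScan pvSpecials text.toList := by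
  unfold unescape_markdown_header_py
  simp only [List.foldl_cons, List.foldl_nil, PySem.Str.toList_replace]
  rw [show ("\\#" : String).toList = ['\\', '#'] from rfl, show ("#" : String).toList = ['#'] from rfl]
  rw [show ("\\*" : String).toList = ['\\', '*'] from rfl, show ("*" : String).toList = ['*'] from rfl]
  rw [show ("\\[" : String).toList = ['\\', '['] from rfl, show ("[" : String).toList = ['['] from rfl]
  rw [show ("\\]" : String).toList = ['\\', ']'] from rfl, show ("]" : String).toList = [']'] from rfl]
  rw [show ("\\(" : String).toList = ['\\', '('] from rfl, show ("(" : String).toList = ['('] from rfl]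
  rw [show ("\\)" : String).toList = ['\\', ')'] from rfl, show (")" : String).toList = [')'] from rfl]
  rw [show ("\\<" : String).toList = ['\\', '<'] from rfl, show ("<" : String).toList = ['<'] from rfl]
  rw [show ("\\>" : String).toList = ['\\', '>'] from rfl, show (">" : String).toList = ['>'] from rfl]
  rw [show ("\\`" : String).toList = ['\\', '`'] from rfl, show ("`" : String).toList = ['`'] from rfl]
  rw [show ("\\_" : String).toList = ['\\', '_'] from rfl, show ("_" : String).toList = ['_'] from rfl]
  rw [show ("\\~" : String).toList = ['\\', '~'] from rfl, show ("~" : String).toList = ['~'] from rfl]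
  rw [pv_replace_eq '#' (by decide)]
  rw [pv_replace_eq '*' (by decide)]
  rw [pv_replace_eq '[' (by decide)]
  rw [pv_replace_eq ']' (by decide)]
  rw [pv_replace_eq '(' (by decide)]
  rw [pv_replace_eq ')' (by decide)]
  rw [pv_replace_eq '<' (by decide)]
  rw [pv_replace_eq '>' (by decide)]
  rw [pv_replace_eq '`' (by decide)]
  rw [pv_replace_eq '_' (by decide)]
  rw [pv_replace_eq '~' (by decide)]
  have e1 : pvScan ['*'] (pvScan ['#'] text.toList) = pvScan ['#', '*'] text.toList :=
    pvScan_comp' '*' ['#'] (by decide) (by decide) (by decide) text.toList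
  have e2 : pvScan ['['] (pvScan ['#', '*'] text.toList) = pvScan ['#', '*', '['] text.toList :=
    pvScan_comp' '[' ['#', '*'] (by decide) (by decide) (by decide) text.toList
  have e3 : pvScan [']'] (pvScan ['#', '*', '['] text.toList) = pvScan ['#', '*', '[', ']'] text.toList :=
    pvScan_comp' ']' ['#', '*', '['] (by decide) (by decide) (by decide) text.toList
  have e4 : pvScan ['('] (pvScan ['#', '*', '[', ']'] text.toList) = pvScan ['#', '*', '[', ']', '('] text.toList :=
    pvScan_comp' '(' ['#', '*', '[', ']'] (by decide) (by decide) (by decide) text.toList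
  have e5 : pvScan [')'] (pvScan ['#', '*', '[', ']', '('] text.toList) = pvScan ['#', '*', '[', ']', '(', ')'] text.toList :=
    pvScan_comp' ')' ['#', '*', '[', ']', '('] (by decide) (by decide) (by decide) text.toList
  have e6 : pvScan ['<'] (pvScan ['#', '*', '[', ']', '(', ')'] text.toList) = pvScan ['#', '*', '[', ']', '(', ')', '<'] text.toList :=
    pvScan_comp' '<' ['#', '*', '[', ']', '(', ')'] (by decide) (by decide) (by decide) text.toList
  have e7 : pvScan ['>'] (pvScan ['#', '*', '[', ']', '(', ')', '<'] text.toList) = pvScan ['#', '*', '[', ']', '(', ')', '<', '>'] text.toList :=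
    pvScan_comp' '>' ['#', '*', '[', ']', '(', ')', '<'] (by decide) (by decide) (by decide) text.toList
  have e8 : pvScan ['`'] (pvScan ['#', '*', '[', ']', '(', ')', '<', '>'] text.toList) = pvScan ['#', '*', '[', ']', '(', ')', '<', '>', '`'] text.toList :=
    pvScan_comp' '`' ['#', '*', '[', ']', '(', ')', '<', '>'] (by decide) (by decide) (by decide) text.toList
  have e9 : pvScan ['_'] (pvScan ['#', '*', '[', ']', '(', ')', '<', '>', '`'] text.toList) = pvScan ['#', '*', '[', ']', '(', ')', '<', '>', '`', '_'] text.toList :=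
    pvScan_comp' '_' ['#', '*', '[', ']', '(', ')', '<', '>', '`'] (by decide) (by decide) (by decide) text.toList
  have e10 : pvScan ['~'] (pvScan ['#', '*', '[', ']', '(', ')', '<', '>', '`', '_'] text.toList) = pvScan ['#', '*', '[', ']', '(', ')', '<', '>', '`', '_', '~'] text.toList :=
    pvScan_comp' '~' ['#', '*', '[', ']', '(', ')', '<', '>', '`', '_'] (by decide) (by decide) (by decide) text.toList
  rw [e1, e2, e3, e4, e5, e6, e7, e8, e9, e10]
  rfl

-- ===== VERDICT (by name: the statement is the Claim_ definition above) =====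
theorem unescape_markdown_header_py_spec : Claim_equal_unescape_markdown_header_py := by
  intro text _
  unfold Spec_unescape_markdown_header_py unescape_markdown_header_py_alt
  apply String.toList_injective
  rw [pv_fold_eq]
  simp
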